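-- pv_equiv track=rewrite | github.com/Count-group/project1 | results/codes/算法竞赛/kimi/H_2.py | dfs
-- ===== SOURCE A (Python) =====
-- def dfs(v, tree, p_values, a, filled, index):
--     if filled[v]:
--         return index
--     a[v] = p_values[index]
--     filled[v] = True
--     index += 1
--     for u in tree[v]:
--         index = dfs(u, tree, p_values, a, filled, index)
--     return index
-- ===== SOURCE B (Python) =====
-- def dfs(v, tree, p_values, a, filled, index):
--     # Iterative DFS with an explicit stack; same in-place mutation of a and
--     # filled as the recursive original, same pre-order fill sequence.
--     stack = [v]
--     while stack:
--         node = stack.pop()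
--         if filled[node]:
--             continue
--         a[node] = p_values[index]
--         filled[node] = True
--         index += 1
--         stack.extend(reversed(tree[node]))
--     return index
-- ===== Notes on version B (the rewrite author's own statement) =====
-- stated objective: alternative
-- what changed: Replaces the recursive pre-order DFS by an iterative DFS over an explicit stack (pop a node, re-check its filled flag, push its children in reverse), eliminating recursion while producing the same fill order and return value.
-- outside the precondition, e.g. on dfs(0, {0: []}, [7], [0, 0], [False, False], 0): A returns 1, B returns 1; on dfs(-1, {-1: []}, [5], [0, 0], [True, False], 0): A returns 1, B returns 1
import Mathlib
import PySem

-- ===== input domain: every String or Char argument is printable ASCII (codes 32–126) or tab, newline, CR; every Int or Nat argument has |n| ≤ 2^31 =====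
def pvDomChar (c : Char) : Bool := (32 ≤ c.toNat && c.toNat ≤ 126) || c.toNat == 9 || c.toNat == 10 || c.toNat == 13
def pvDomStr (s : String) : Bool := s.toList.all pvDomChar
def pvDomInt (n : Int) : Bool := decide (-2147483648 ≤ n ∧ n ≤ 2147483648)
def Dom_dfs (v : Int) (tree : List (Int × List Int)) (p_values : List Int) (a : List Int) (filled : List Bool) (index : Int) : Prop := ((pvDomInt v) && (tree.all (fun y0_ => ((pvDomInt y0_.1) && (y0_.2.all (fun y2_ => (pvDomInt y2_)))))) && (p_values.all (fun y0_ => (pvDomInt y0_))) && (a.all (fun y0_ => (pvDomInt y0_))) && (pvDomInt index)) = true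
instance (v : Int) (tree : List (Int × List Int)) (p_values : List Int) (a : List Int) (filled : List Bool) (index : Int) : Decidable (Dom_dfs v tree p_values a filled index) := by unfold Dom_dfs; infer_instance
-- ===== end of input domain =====

-- B replaces the recursive DFS by an iterative DFS over an explicit stack (same
-- pre-order fill sequence, same return value, same in-place mutation of a and
-- filled by the Python B); the equivalence proved here is about the RETURN value.

-- ===== PORT A =====
-- dfsRec is the literal recursion of A, threading the mutated (index, a, filled)
-- state; the fuel argument only makes the recursion well-founded in Lean (each
-- filling step strictly decreases the number of False entries in filled, so
-- filled.count false + 1 fuel always suffices; it is spent only on real calls).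
def dfsRec : Nat → Int → List (Int × List Int) → List Int → List Int → List Bool → Int → Int × List Int × List Bool
  | 0, _, _, _, a, filled, index => (index, a, filled)
  | fuel+1, v, tree, p_values, a, filled, index =>
    match PySem.List.pyGet? filled v with
    | none => (index, a, filled)          -- IndexError in Python (outside Pre_)
    | some true => (index, a, filled)
    | some false =>
      match PySem.List.pyGet? p_values index with
      | none => (index, a, filled)        -- IndexError in Python (outside Pre_)
      | some pv =>
        let a' := PySem.List.pySetD a v pv
        let filled' := PySem.List.pySetD filled v true
        match PySem.Dict.get? (PySem.Dict.mk tree) v with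
        | none => (index + 1, a', filled') -- KeyError in Python (outside Pre_)
        | some children =>
          children.foldl (fun st u => dfsRec fuel u tree p_values st.2.1 st.2.2 st.1)
            (index + 1, a', filled')

def dfs (v : Int) (tree : List (Int × List Int)) (p_values : List Int) (a : List Int) (filled : List Bool) (index : Int) : Int :=
  (dfsRec (filled.count false + 1) v tree p_values a filled index).1

-- ===== PORT B =====
-- termination helper for the stack loop: popping an unfilled node and marking it
-- filled decreases the number of False entries in filled by exactly one
lemma count_false_set_true (xs : List Bool) (n : Nat) (hn : n < xs.length) (hx : xs[n] = false) :
    (xs.set n true).count false + 1 = xs.count false := by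
  induction xs generalizing n with
  | nil => simp at hn
  | cons x xs ih =>
    cases n with
    | zero => simp at hx; subst hx; simp
    | succ n =>
      simp at hn hx
      have := ih n hn hx
      simp only [List.set_cons_succ, List.count_cons]
      omega

lemma count_false_pySetD (xs : List Bool) (i : Int)
    (h : PySem.List.pyGet? xs i = some false) :
    (PySem.List.pySetD xs i true).count false + 1 = xs.count false := by
  unfold PySem.List.pyGet? PySem.List.pySetD PySem.List.pySet? PySem.List.pyIdx? at *
  split_ifs at h with h1 h2 h3
  · simp only [Option.bind] at h
    have hn : i.toNat < xs.length := by omega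
    have hx : xs[i.toNat] = false := by simpa [List.getElem?_eq_getElem hn] using h
    simpa [h1, h2, hn] using count_false_set_true xs i.toNat hn hx
  · simp at h
  · simp only [Option.bind] at h
    have hn : xs.length - (-i).toNat < xs.length := by omega
    have hx : xs[xs.length - (-i).toNat] = false := by simpa [List.getElem?_eq_getElem hn] using h
    simpa [h1, h3] using count_false_set_true xs _ hn hx
  · simp at h

-- the while-loop of B: stack head = top of the Python stack (Python pops from the
-- end and extends with reversed(children), so in this model children are pushed
-- in source order in front of the rest)
def dfsLoop (tree : List (Int × List Int)) (p_values : List Int)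
    (stack : List Int) (a : List Int) (filled : List Bool) (index : Int) : Int :=
  match stack with
  | [] => index
  | node :: rest =>
    match h : PySem.List.pyGet? filled node with
    | none => index                        -- IndexError in Python (outside Pre_)
    | some true => dfsLoop tree p_values rest a filled index
    | some false =>
      match PySem.List.pyGet? p_values index with
      | none => index                      -- IndexError in Python (outside Pre_)
      | some pv =>
        match PySem.Dict.get? (PySem.Dict.mk tree) node with
        | none => index + 1                -- KeyError in Python (outside Pre_)
        | some children =>
          dfsLoop tree p_values (children ++ rest)
            (PySem.List.pySetD a node pv) (PySem.List.pySetD filled node true) (index + 1)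
  termination_by (filled.count false, stack.length)
  decreasing_by
  · exact Prod.Lex.right _ (by simp)
  · exact Prod.Lex.left _ _ (by have := count_false_pySetD filled node h; omega)

def dfs_alt (v : Int) (tree : List (Int × List Int)) (p_values : List Int) (a : List Int) (filled : List Bool) (index : Int) : Int :=
  dfsLoop tree p_values [v] a filled index

-- ===== PRECONDITION & SPEC =====
-- Pre_dfs admits (i) the trivial runs, where the start node's filled flag is
-- already True (Python returns index at once, for any other arguments), and
-- (ii) the natural well-formed domain: the start node a nonnegative in-range
-- index of filled, a of the same length, every in-range node with a child list
-- in tree whose entries are again nonnegative in-range indices, and p_values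
-- long enough for all unfilled nodes.  This is a (stated) narrowing: outside it
-- A can still return, e.g. via negative-index wraparound of the start node or
-- when tree entries / p_values are missing only for nodes the traversal never
-- happens to reach.
def Pre_dfs (v : Int) (tree : List (Int × List Int)) (p_values : List Int) (a : List Int) (filled : List Bool) (index : Int) : Prop :=
  PySem.List.pyGet? filled v = some true ∨
  (0 ≤ v ∧ v < (filled.length : Int) ∧ a.length = filled.length ∧
   0 ≤ index ∧ index + (filled.count false : Int) ≤ (p_values.length : Int) ∧
   ∀ i < filled.length,
     ∃ cs, PySem.Dict.get? (PySem.Dict.mk tree) (i : Int) = some cs ∧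
       ∀ c ∈ cs, 0 ≤ c ∧ c < (filled.length : Int))
instance (v : Int) (tree : List (Int × List Int)) (p_values : List Int) (a : List Int) (filled : List Bool) (index : Int) : Decidable (Pre_dfs v tree p_values a filled index) := by unfold Pre_dfs; infer_instance

def pvWitness_dfs : Int × (List (Int × List Int)) × List Int × List Int × List Bool × Int :=
  (0, [(0, [1, 2]), (1, []), (2, [1])], [10, 20, 30], [0, 0, 0], [false, false, false], 0)

def Spec_dfs (v : Int) (tree : List (Int × List Int)) (p_values : List Int) (a : List Int) (filled : List Bool) (index : Int) (out : Int) : Prop := out = dfs_alt v tree p_values a filled index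
instance (v : Int) (tree : List (Int × List Int)) (p_values : List Int) (a : List Int) (filled : List Bool) (index : Int) (out : Int) : Decidable (Spec_dfs v tree p_values a filled index out) := by unfold Spec_dfs; infer_instance

-- ===== CLAIM (what is proved, stated in full; the proofs are below) =====
def Claim_equal_dfs : Prop := ∀ (v : Int) (tree : List (Int × List Int)) (p_values : List Int) (a : List Int) (filled : List Bool) (index : Int), Dom_dfs v tree p_values a filled index → Pre_dfs v tree p_values a filled index → Spec_dfs v tree p_values a filled index (dfs v tree p_values a filled index)

-- ===== LEMMAS AND PROOFS =====

-- node id in range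
def InR (n : Nat) (i : Int) : Prop := 0 ≤ i ∧ i < (n : Int)

-- well-formed child lists
def TreeOK (tree : List (Int × List Int)) (n : Nat) : Prop :=
  ∀ i : Int, InR n i → ∃ cs, PySem.Dict.get? (PySem.Dict.mk tree) i = some cs ∧ ∀ c ∈ cs, InR n c

lemma dfsRec_state (fuel : Nat) :
    ∀ (v : Int) (tree : List (Int × List Int)) (p a : List Int) (filled : List Bool) (index : Int),
      TreeOK tree filled.length → InR filled.length v →
      (dfsRec fuel v tree p a filled index).2.2.length = filled.length ∧
      (dfsRec fuel v tree p a filled index).1 + ((dfsRec fuel v tree p a filled index).2.2.count false : Int)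
        = index + (filled.count false : Int) ∧
      (dfsRec fuel v tree p a filled index).2.2.count false ≤ filled.count false := by
  induction fuel with
  | zero => intro v tree p a filled index _ _; simp [dfsRec]
  | succ fuel ih =>
    intro v tree p a filled index hT hv
    cases hfv : PySem.List.pyGet? filled v with
    | none => simp [dfsRec, hfv]
    | some b =>
      cases b with
      | true => simp [dfsRec, hfv]
      | false =>
        cases hpi : PySem.List.pyGet? p index with
        | none => simp [dfsRec, hfv, hpi]
        | some pv =>
          obtain ⟨cs, hcs, hcsr⟩ := hT v hv
          have hlen' : (PySem.List.pySetD filled v true).length = filled.length :=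
            PySem.List.length_pySetD ..
          have hcnt' := count_false_pySetD filled v hfv
          have fold : ∀ (cs2 : List Int) (i2 : Int) (a2 : List Int) (f2 : List Bool),
              (∀ c ∈ cs2, InR filled.length c) → f2.length = filled.length →
              (cs2.foldl (fun st u => dfsRec fuel u tree p st.2.1 st.2.2 st.1) (i2, a2, f2)).2.2.length = filled.length ∧
              (cs2.foldl (fun st u => dfsRec fuel u tree p st.2.1 st.2.2 st.1) (i2, a2, f2)).1 +
                ((cs2.foldl (fun st u => dfsRec fuel u tree p st.2.1 st.2.2 st.1) (i2, a2, f2)).2.2.count false : Int)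
                = i2 + (f2.count false : Int) ∧
              (cs2.foldl (fun st u => dfsRec fuel u tree p st.2.1 st.2.2 st.1) (i2, a2, f2)).2.2.count false ≤ f2.count false := by
            intro cs2
            induction cs2 with
            | nil => intro i2 a2 f2 _ hlen; exact ⟨hlen, rfl, le_refl _⟩
            | cons c cs2 ih2 =>
              intro i2 a2 f2 hin hlen
              have hT' : TreeOK tree f2.length := hlen ▸ hT
              have hc : InR f2.length c := hlen ▸ hin c (by simp)
              obtain ⟨l1, s1, c1⟩ := ih c tree p a2 f2 i2 hT' hc
              obtain ⟨l2, s2, c2⟩ := ih2 (dfsRec fuel c tree p a2 f2 i2).1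
                (dfsRec fuel c tree p a2 f2 i2).2.1 (dfsRec fuel c tree p a2 f2 i2).2.2
                (fun x hx => hin x (by simp [hx])) (l1.trans hlen)
              have hstep : (c :: cs2).foldl (fun st u => dfsRec fuel u tree p st.2.1 st.2.2 st.1) (i2, a2, f2)
                  = cs2.foldl (fun st u => dfsRec fuel u tree p st.2.1 st.2.2 st.1)
                      ((dfsRec fuel c tree p a2 f2 i2).1, (dfsRec fuel c tree p a2 f2 i2).2.1,
                       (dfsRec fuel c tree p a2 f2 i2).2.2) := by
                simp
              rw [hstep]
              exact ⟨l2, by omega, by omega⟩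
          obtain ⟨l3, s3, c3⟩ := fold cs (index + 1) (PySem.List.pySetD a v pv)
            (PySem.List.pySetD filled v true) (fun c hc => hcsr c hc) hlen'
          simp only [dfsRec, hfv, hpi, hcs]
          exact ⟨l3, by omega, by omega⟩

lemma loop_cons (fuel : Nat) :
    ∀ (v : Int) (rest : List Int) (tree : List (Int × List Int)) (p a : List Int) (filled : List Bool) (index : Int),
      TreeOK tree filled.length → InR filled.length v →
      0 ≤ index → index + (filled.count false : Int) ≤ (p.length : Int) →
      filled.count false < fuel →
      dfsLoop tree p (v :: rest) a filled index =
        dfsLoop tree p rest (dfsRec fuel v tree p a filled index).2.1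
          (dfsRec fuel v tree p a filled index).2.2 (dfsRec fuel v tree p a filled index).1 := by
  induction fuel with
  | zero => intro v rest tree p a filled index _ _ _ _ hfuel; omega
  | succ fuel ih =>
    intro v rest tree p a filled index hT hv hi0 hip hfuel
    obtain ⟨hv1, hv2⟩ := hv
    rw [dfsLoop]
    split
    · rename_i hfv
      exfalso
      rw [PySem.List.pyGet?_eq_none_iff] at hfv
      exact hfv ⟨by omega, hv2⟩
    · rename_i hfv
      simp only [dfsRec, hfv]
    · rename_i hfv
      have hcpos : 0 < filled.count false :=
        List.count_pos_iff.mpr (PySem.List.mem_of_pyGet?_eq_some _ hfv)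
      have hidx : index.toNat < p.length := by omega
      have hpi : PySem.List.pyGet? p index = some p[index.toNat] := by
        rw [PySem.List.pyGet?_of_nonneg p hi0]
        exact List.getElem?_eq_getElem hidx
      obtain ⟨cs, hcs, hcsr⟩ := hT v ⟨hv1, hv2⟩
      have hlen' : (PySem.List.pySetD filled v true).length = filled.length :=
        PySem.List.length_pySetD ..
      have hcnt' := count_false_pySetD filled v hfv
      have append : ∀ (cs2 rest2 : List Int) (a2 : List Int) (filled2 : List Bool) (index2 : Int),
          (∀ c ∈ cs2, InR filled.length c) → filled2.length = filled.length →
          0 ≤ index2 → index2 + (filled2.count false : Int) ≤ (p.length : Int) →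
          filled2.count false < fuel →
          dfsLoop tree p (cs2 ++ rest2) a2 filled2 index2 =
            dfsLoop tree p rest2
              (cs2.foldl (fun st u => dfsRec fuel u tree p st.2.1 st.2.2 st.1) (index2, a2, filled2)).2.1
              (cs2.foldl (fun st u => dfsRec fuel u tree p st.2.1 st.2.2 st.1) (index2, a2, filled2)).2.2
              (cs2.foldl (fun st u => dfsRec fuel u tree p st.2.1 st.2.2 st.1) (index2, a2, filled2)).1 := by
        intro cs2
        induction cs2 with
        | nil => intro rest2 a2 filled2 index2 _ _ _ _ _; simp
        | cons c cs2 ih2 =>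
          intro rest2 a2 filled2 index2 hin hlen2 hi2 hip2 hf2
          have hT2 : TreeOK tree filled2.length := hlen2 ▸ hT
          have hc2 : InR filled2.length c := hlen2 ▸ hin c (by simp)
          obtain ⟨l1, s1, c1⟩ := dfsRec_state fuel c tree p a2 filled2 index2 hT2 hc2
          have hstep : (c :: cs2).foldl (fun st u => dfsRec fuel u tree p st.2.1 st.2.2 st.1) (index2, a2, filled2)
              = cs2.foldl (fun st u => dfsRec fuel u tree p st.2.1 st.2.2 st.1)
                  ((dfsRec fuel c tree p a2 filled2 index2).1, (dfsRec fuel c tree p a2 filled2 index2).2.1,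
                   (dfsRec fuel c tree p a2 filled2 index2).2.2) := by
            simp
          rw [List.cons_append,
            ih c (cs2 ++ rest2) tree p a2 filled2 index2 hT2 hc2 hi2 hip2 hf2,
            ih2 rest2 (dfsRec fuel c tree p a2 filled2 index2).2.1
              (dfsRec fuel c tree p a2 filled2 index2).2.2
              (dfsRec fuel c tree p a2 filled2 index2).1
              (fun x hx => hin x (by simp [hx])) (l1.trans hlen2)
              (by omega) (by omega) (by omega), hstep]
      rw [hpi]
      simp only [hcs]
      simp only [dfsRec, hfv, hpi, hcs]
      exact append cs rest (PySem.List.pySetD a v p[index.toNat])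
        (PySem.List.pySetD filled v true) (index + 1)
        (fun c hc => hcsr c hc) hlen' (by omega) (by omega) (by omega)

-- ===== VERDICT (by name: the statement is the Claim_ definition above) =====
theorem dfs_spec : Claim_equal_dfs := by
  intro v tree p a filled index _ hpre
  unfold Spec_dfs dfs dfs_alt
  rcases hpre with hfT | ⟨hv0, hvlt, _, hi0, hip, htree⟩
  · rw [dfsLoop]
    split
    · rename_i hfv; rw [hfT] at hfv; cases hfv
    · simp [dfsRec, hfT, dfsLoop]
    · rename_i hfv; rw [hfT] at hfv; cases hfv
  · have hT : TreeOK tree filled.length := by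
      intro i ⟨h0, h1⟩
      have : i.toNat < filled.length := by omega
      obtain ⟨cs, hcs, hall⟩ := htree i.toNat this
      refine ⟨cs, by simpa [Int.toNat_of_nonneg h0] using hcs,
        fun c hc => ⟨(hall c hc).1, (hall c hc).2⟩⟩
    rw [loop_cons (filled.count false + 1) v [] tree p a filled index hT ⟨hv0, hvlt⟩ hi0 hip (by omega)]
    simp [dfsLoop]
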